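-- pv_equiv track=rewrite | github.com/SamMarckson/Python-Practice | Is my friend cheating.py | remov_nb
-- ===== SOURCE A (Python) =====
-- def remov_nb(n):
--     somaTotal = (n*(n + 1)) // 2
--     listaExcluidos = []
--
--     for b in range(n, 0, -1):
--         a = (somaTotal - b) // (b + 1)
--
--         if a <= n and a*b == somaTotal - (a + b):
--             listaExcluidos.append((a, b))
--
--     return listaExcluidos
-- ===== SOURCE B (Python) =====
-- def remov_nb(n):
--     # Divisor-pair enumeration: a*b == total-(a+b)  <=>  (a+1)*(b+1) == total+1.
--     if n < 1:
--         return []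
--     M = n * (n + 1) // 2 + 1
--     found = set()
--     d = 1
--     while d * d <= M:
--         if M % d == 0:
--             for c in (d, M // d):
--                 b = c - 1
--                 if 1 <= b <= n and M // c - 1 <= n:
--                     found.add((M // c - 1, b))
--         d += 1
--     # b determines a, so the key is injective on found; sort by b descending.
--     return sorted(found, key=lambda p: -p[1])
-- ===== Notes on version B (the rewrite author's own statement) =====
-- stated objective: faster
-- what changed: Replaces A's linear scan over every candidate b up to n (recomputing a and verifying the product equation) by enumerating divisor pairs of the successor of the triangular total up to its square root (the defining equation says the successors of a and b multiply to that number), collecting the valid pairs into a set and sorting them by b descending.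
import Mathlib
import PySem

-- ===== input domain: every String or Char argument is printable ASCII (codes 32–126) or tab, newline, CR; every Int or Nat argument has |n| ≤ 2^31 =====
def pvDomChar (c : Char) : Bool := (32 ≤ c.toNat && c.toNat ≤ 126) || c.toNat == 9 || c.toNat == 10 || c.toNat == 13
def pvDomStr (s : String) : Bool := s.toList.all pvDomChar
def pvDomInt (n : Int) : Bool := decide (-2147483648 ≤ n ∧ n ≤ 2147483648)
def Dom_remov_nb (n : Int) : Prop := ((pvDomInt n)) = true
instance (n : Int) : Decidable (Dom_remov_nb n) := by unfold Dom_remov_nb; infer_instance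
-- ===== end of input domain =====

-- B replaces A's linear scan over the candidate range with divisor-pair enumeration of M = total+1
-- up to √M (using (a+1)(b+1) = M), then sorts the few hits by b descending.

-- ===== PORT A =====
def remov_nb (n : Int) : List (Int × Int) :=
  let somaTotal := PySem.Int.floordiv (n * (n + 1)) 2
  (PySem.List.pyRange n 0 (-1)).foldl
    (fun acc b =>
      let a := PySem.Int.floordiv (somaTotal - b) (b + 1)
      if a ≤ n ∧ a * b = somaTotal - (a + b) then acc ++ [(a, b)] else acc) []

-- ===== PORT B =====
-- 'while d * d <= M: … d += 1' of Source B; terminates because d grows past √M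
def remov_nb_altLoop (M n d : Int) (found : PySem.Set (Int × Int)) : PySem.Set (Int × Int) :=
  if h : d * d ≤ M then
    remov_nb_altLoop M n (d + 1)
      (if PySem.Int.mod M d = 0 then
        [d, PySem.Int.floordiv M d].foldl
          (fun s c =>
            if 1 ≤ c - 1 ∧ c - 1 ≤ n ∧ PySem.Int.floordiv M c - 1 ≤ n then
              PySem.Set.add s (PySem.Int.floordiv M c - 1, c - 1)
            else s) found
      else found)
  else found
termination_by (M + 1 - d).toNat
decreasing_by
  have hdM : d ≤ M := by nlinarith [sq_nonneg d, sq_nonneg (d - 1)]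
  omega

def remov_nb_alt (n : Int) : List (Int × Int) :=
  if n < 1 then []
  else
    let M := PySem.Int.floordiv (n * (n + 1)) 2 + 1
    PySem.List.sorted (remov_nb_altLoop M n 1 PySem.Set.empty) (fun p => -p.2)

-- ===== PRECONDITION & SPEC =====
def Spec_remov_nb (n : Int) (out : List (Int × Int)) : Prop := out = remov_nb_alt n
instance (n : Int) (out : List (Int × Int)) : Decidable (Spec_remov_nb n out) := by unfold Spec_remov_nb; infer_instance

-- ===== CLAIM (what is proved, stated in full; the proofs are below) =====
def Claim_equal_remov_nb : Prop := ∀ (n : Int), Dom_remov_nb n → Spec_remov_nb n (remov_nb n)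

-- ===== LEMMAS AND PROOFS =====

-- the common characterisation: x appears iff x = (M/e - 1, e - 1) for a divisor e of M with 2 ≤ e ≤ n+1 and M/e ≤ n+1
def GoodPair (n M : Int) (x : Int × Int) : Prop :=
  ∃ e : Int, 2 ≤ e ∧ e ≤ n + 1 ∧ e ∣ M ∧ M / e ≤ n + 1 ∧ x = (M / e - 1, e - 1)

theorem foldl_if_append {α β : Type} (p : α → Prop) [DecidablePred p] (f : α → β)
    (l : List α) (acc : List β) :
    l.foldl (fun acc x => if p x then acc ++ [f x] else acc) acc
      = acc ++ (l.filter (fun x => decide (p x))).map f := by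
  induction l generalizing acc with
  | nil => simp
  | cons x t ih =>
    by_cases h : p x <;> simp [h, ih]

theorem remov_nb_shape (n : Int) :
    remov_nb n = ((PySem.List.pyRange n 0 (-1)).filter
        (fun b => decide (PySem.Int.floordiv (PySem.Int.floordiv (n * (n + 1)) 2 - b) (b + 1) ≤ n ∧
          PySem.Int.floordiv (PySem.Int.floordiv (n * (n + 1)) 2 - b) (b + 1) * b =
            PySem.Int.floordiv (n * (n + 1)) 2 -
              (PySem.Int.floordiv (PySem.Int.floordiv (n * (n + 1)) 2 - b) (b + 1) + b)))).map
      (fun b => (PySem.Int.floordiv (PySem.Int.floordiv (n * (n + 1)) 2 - b) (b + 1), b)) := by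
  unfold remov_nb
  exact foldl_if_append _ _ _ _

theorem a_eq (M b : Int) (hb : 1 ≤ b) :
    PySem.Int.floordiv ((M - 1) - b) (b + 1) = M / (b + 1) - 1 := by
  rw [PySem.Int.floordiv_eq_ediv_of_pos (by omega : (0:Int) < b + 1)]
  have h : (M - 1) - b = M + (-1) * (b + 1) := by ring
  rw [h, Int.add_mul_ediv_right _ _ (by omega : b + 1 ≠ 0)]
  ring

theorem cond_iff (n M b : Int) (_hb : 1 ≤ b) :
    (M / (b + 1) - 1 ≤ n ∧ (M / (b + 1) - 1) * b = (M - 1) - ((M / (b + 1) - 1) + b)) ↔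
      ((b + 1) ∣ M ∧ M / (b + 1) ≤ n + 1) := by
  set q := M / (b + 1) with hq
  have hprod : ((q - 1) + 1) * (b + 1) = (q - 1) * b + (q - 1) + b + 1 := by ring
  constructor
  · rintro ⟨h1, h2⟩
    have hqb : q * (b + 1) = M := by nlinarith
    exact ⟨Dvd.intro q (by linarith [hqb] ; ), by omega⟩
  · rintro ⟨hdvd, h2⟩
    have hqb : q * (b + 1) = M := Int.ediv_mul_cancel hdvd
    constructor
    · omega
    · nlinarith

theorem mem_remov_nb (n M : Int) (hM : M = PySem.Int.floordiv (n * (n + 1)) 2 + 1)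
    (x : Int × Int) : x ∈ remov_nb n ↔ GoodPair n M x := by
  rw [remov_nb_shape]
  simp only [List.mem_map, List.mem_filter, PySem.List.mem_pyRange_neg_one, decide_eq_true_eq]
  constructor
  · rintro ⟨b, ⟨⟨hb0, hbn⟩, hcond⟩, hx⟩
    have hb : 1 ≤ b := hb0
    have hT : PySem.Int.floordiv (n * (n + 1)) 2 = M - 1 := by omega
    rw [hT, a_eq M b hb] at hcond hx
    have := (cond_iff n M b hb).mp hcond
    refine ⟨b + 1, by omega, by omega, this.1, this.2, ?_⟩
    rw [← hx]
    norm_num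
  · rintro ⟨e, he2, hen, hdvd, hMe, hx⟩
    have hT : PySem.Int.floordiv (n * (n + 1)) 2 = M - 1 := by omega
    have he1 : e - 1 + 1 = e := by omega
    refine ⟨e - 1, ⟨⟨by omega, by omega⟩, ?_⟩, ?_⟩
    · rw [hT, a_eq M (e - 1) (by omega), he1]
      have h2 := (cond_iff n M (e - 1) (by omega)).mpr (by rw [he1]; exact ⟨hdvd, hMe⟩)
      rw [he1] at h2
      exact h2
    · rw [hT, a_eq M (e - 1) (by omega), he1, hx]

theorem pairwise_remov_nb (n : Int) :
    (remov_nb n).Pairwise (fun p q : Int × Int => -p.2 < -q.2) := by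
  rw [remov_nb_shape]
  rw [List.pairwise_map]
  apply List.Pairwise.filter
  rw [PySem.List.pyRange_neg_one_eq_reverse, List.pairwise_reverse]
  exact (PySem.List.pairwise_lt_pyRange_one (0 + 1) (n + 1)).imp (by intro a b h; simpa using h)

theorem nodup_remov_nb (n : Int) : (remov_nb n).Nodup := by
  exact (pairwise_remov_nb n).imp (fun h => by intro hEq; rw [hEq] at h; omega)

theorem ediv_dvd_self (a b : Int) (h : a ∣ b) : b / a ∣ b := by
  obtain ⟨k, rfl⟩ := h
  by_cases h0 : a = 0
  · simp [h0]
  · rw [Int.mul_ediv_cancel_left _ h0]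
    exact ⟨a, mul_comm a k⟩

-- membership in the conditional add of Source B's inner loop body
theorem mem_addIf {α : Type} [BEq α] [LawfulBEq α] (P : Prop) [Decidable P]
    (S : PySem.Set α) (y x : α) :
    (x ∈ (if P then PySem.Set.add S y else S)) ↔ x ∈ S ∨ (P ∧ x = y) := by
  split_ifs with h
  · rw [PySem.Set.mem_add]; tauto
  · tauto

theorem mem_altLoop (M n d : Int) (S : PySem.Set (Int × Int)) (x : Int × Int) (hM : 1 ≤ M) :
    1 ≤ d →
    (x ∈ remov_nb_altLoop M n d S ↔ x ∈ S ∨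
      ∃ e : Int, 1 ≤ e ∧ e ∣ M ∧ d ≤ e ∧ d ≤ M / e ∧
        (2 ≤ e ∧ e - 1 ≤ n ∧ M / e - 1 ≤ n) ∧ x = (M / e - 1, e - 1)) := by
  fun_induction remov_nb_altLoop M n d S with
  | case1 d S h ih =>
    intro hd
    refine (ih (by omega)).trans ?_
    simp only [dite_eq_ite]
    by_cases hdvd : PySem.Int.mod M d = 0
    · have hdM : d ∣ M := (PySem.Int.mod_eq_zero_iff_dvd M d).mp hdvd
      have hf1 : 1 ≤ M / d := by
        rw [Int.le_ediv_iff_mul_le (by omega : (0:Int) < d)]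
        have := Int.le_of_dvd (by omega) hdM
        omega
      have hfdvd : (M / d) ∣ M := ediv_dvd_self d M hdM
      have hMf : M / (M / d) = d := by
        obtain ⟨k, hk⟩ := hdM
        have hkd : M / d = k := by rw [hk]; exact Int.mul_ediv_cancel_left k (by omega)
        rw [hkd, hk, Int.mul_ediv_cancel d (by omega : k ≠ 0)]
      have hdf : d ≤ M / d := by
        rw [Int.le_ediv_iff_mul_le (by omega : (0:Int) < d)]; exact h
      rw [if_pos hdvd]
      simp only [List.foldl_cons, List.foldl_nil]
      rw [PySem.Int.floordiv_eq_ediv_of_pos (by omega : (0:Int) < d),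
        PySem.Int.floordiv_eq_ediv_of_pos (by omega : (0:Int) < M / d)]
      rw [mem_addIf, mem_addIf, hMf]
      constructor
      · rintro (((hS | ⟨hk, hx⟩) | ⟨hk, hx⟩) | ⟨e, he1, hedvd, hde, hdMe, hke, hx⟩)
        · exact Or.inl hS
        · exact Or.inr ⟨d, by omega, hdM, by omega, hdf, by omega, hx⟩
        · exact Or.inr ⟨M / d, by omega, hfdvd, hdf, by omega, by omega,
            by rw [hMf]; exact hx⟩
        · exact Or.inr ⟨e, he1, hedvd, by omega, by omega, hke, hx⟩
      · rintro (hS | ⟨e, he1, hedvd, hde, hdMe, hke, hx⟩)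
        · exact Or.inl (Or.inl (Or.inl hS))
        · by_cases hcase : d + 1 ≤ e ∧ d + 1 ≤ M / e
          · exact Or.inr ⟨e, he1, hedvd, hcase.1, hcase.2, hke, hx⟩
          · rcases (by omega : e = d ∨ M / e = d) with heq | heq
            · subst heq; exact Or.inl (Or.inl (Or.inr ⟨by omega, hx⟩))
            · obtain ⟨k, hk⟩ := hedvd
              have hke' : M / e = k := by
                rw [hk]; exact Int.mul_ediv_cancel_left k (by omega)
              have hfe : M / d = e := by
                rw [show d = k by omega, hk, Int.mul_ediv_cancel e (by omega : k ≠ 0)]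
              refine Or.inl (Or.inr ⟨by omega, ?_⟩)
              rw [hfe, ← heq]
              exact hx
    · rw [if_neg hdvd]
      have hndvd : ¬ d ∣ M := fun hc => hdvd ((PySem.Int.mod_eq_zero_iff_dvd M d).mpr hc)
      constructor
      · rintro (hS | ⟨e, he1, hedvd, hde, hdMe, hke, hx⟩)
        · exact Or.inl hS
        · exact Or.inr ⟨e, he1, hedvd, by omega, by omega, hke, hx⟩
      · rintro (hS | ⟨e, he1, hedvd, hde, hdMe, hke, hx⟩)
        · exact Or.inl hS
        · have hed : e ≠ d := fun hc => hndvd (hc ▸ hedvd)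
          have hMed : M / e ≠ d := by
            intro hc
            exact hndvd (hc ▸ ediv_dvd_self e M hedvd)
          exact Or.inr ⟨e, he1, hedvd, by omega, by omega, hke, hx⟩
  | case2 d S h =>
    intro hd
    constructor
    · exact Or.inl
    · rintro (hS | ⟨e, he1, hedvd, hde, hdMe, hke, hx⟩)
      · exact hS
      · exfalso
        apply h
        calc d * d ≤ e * (M / e) := by
              apply mul_le_mul hde hdMe (by omega) (by omega)
          _ = M := by rw [mul_comm]; exact Int.ediv_mul_cancel hedvd

theorem nodup_altLoop (M n d : Int) (S : PySem.Set (Int × Int)) (hS : S.Nodup) :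
    (remov_nb_altLoop M n d S).Nodup := by
  fun_induction remov_nb_altLoop M n d S with
  | case1 d S h ih =>
    apply ih
    split_ifs with h1
    · simp only [List.foldl_cons, List.foldl_nil]
      split_ifs <;> first
        | exact PySem.Set.nodup_add _ _ (PySem.Set.nodup_add _ _ hS)
        | exact PySem.Set.nodup_add _ _ hS
        | exact hS
    · exact hS
  | case2 d S h => exact hS

theorem mem_found (n M : Int) (hM : 1 ≤ M) (x : Int × Int) :
    x ∈ remov_nb_altLoop M n 1 PySem.Set.empty ↔ GoodPair n M x := by
  rw [mem_altLoop M n 1 PySem.Set.empty x hM le_rfl]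
  constructor
  · rintro (hS | ⟨e, he1, hedvd, _, _, hke, hx⟩)
    · simp [PySem.Set.empty] at hS
    · exact ⟨e, hke.1, by omega, hedvd, by omega, hx⟩
  · rintro ⟨e, he2, hen, hedvd, hMe, hx⟩
    refine Or.inr ⟨e, by omega, hedvd, by omega, ?_, ⟨he2, by omega, by omega⟩, hx⟩
    rw [Int.le_ediv_iff_mul_le (by omega : (0:Int) < e)]
    have := Int.le_of_dvd (by omega) hedvd
    omega

-- ===== VERDICT (by name: the statement is the Claim_ definition above) =====
theorem remov_nb_spec : Claim_equal_remov_nb := by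
  intro n _
  unfold Spec_remov_nb
  by_cases hn : n < 1
  · rw [remov_nb_shape, remov_nb_alt, if_pos hn,
      PySem.List.pyRange_neg_one_eq_nil (by omega : n ≤ 0)]
    simp
  · have hn1 : 1 ≤ n := by omega
    rw [remov_nb_alt, if_neg hn]
    have hM : 2 ≤ PySem.Int.floordiv (n * (n + 1)) 2 + 1 := by
      rw [PySem.Int.floordiv_eq_ediv_of_pos (by omega : (0:Int) < 2)]
      have h2 : (1:Int) ≤ n * (n + 1) / 2 := by
        rw [Int.le_ediv_iff_mul_le (by omega : (0:Int) < 2)]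
        nlinarith
      omega
    symm
    apply PySem.List.sorted_eq_of_perm_of_pairwise_lt
    · rw [List.perm_ext_iff_of_nodup (nodup_remov_nb n)
        (nodup_altLoop _ _ _ _ (by simp [PySem.Set.empty]))]
      intro x
      rw [mem_remov_nb n _ rfl, mem_found n _ (by omega)]
    · exact pairwise_remov_nb n
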